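-- pv_equiv track=rewrite | github.com/dreamhungry/persona-gap | src/persona_gap/agents/llm_agent.py | _fuzzy_match_action
-- ===== SOURCE A (Python) =====
-- def _fuzzy_match_action(
--     action: str, legal_actions: list[str]
-- ) -> str | None:
--     """Try to match the LLM's output to a legal action (case-insensitive)."""
--     action_lower = action.strip().lower()
--     for la in legal_actions:
--         if la.lower() == action_lower:
--             return la
--     # Check if legal action is contained in the response
--     for la in legal_actions:
--         if la.lower() in action_lower:
--             return la
--     return None
-- ===== SOURCE B (Python) =====
-- def _fuzzy_match_action(
--     action: str, legal_actions: list[str]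
-- ) -> str | None:
--     """Single pass: return on exact lowercase match; remember first containment."""
--     action_lower = action.strip().lower()
--     first_contains = None
--     for la in legal_actions:
--         llow = la.lower()
--         if llow == action_lower:
--             return la
--         if first_contains is None and llow in action_lower:
--             first_contains = la
--     return first_contains
-- ===== Notes on version B (the rewrite author's own statement) =====
-- stated objective: alternative
-- what changed: Replaces A's two sequential scans (exact-match scan, then containment scan) by a single pass that returns on the first exact match and remembers the first containment match in an accumulator.
import Mathlib
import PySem

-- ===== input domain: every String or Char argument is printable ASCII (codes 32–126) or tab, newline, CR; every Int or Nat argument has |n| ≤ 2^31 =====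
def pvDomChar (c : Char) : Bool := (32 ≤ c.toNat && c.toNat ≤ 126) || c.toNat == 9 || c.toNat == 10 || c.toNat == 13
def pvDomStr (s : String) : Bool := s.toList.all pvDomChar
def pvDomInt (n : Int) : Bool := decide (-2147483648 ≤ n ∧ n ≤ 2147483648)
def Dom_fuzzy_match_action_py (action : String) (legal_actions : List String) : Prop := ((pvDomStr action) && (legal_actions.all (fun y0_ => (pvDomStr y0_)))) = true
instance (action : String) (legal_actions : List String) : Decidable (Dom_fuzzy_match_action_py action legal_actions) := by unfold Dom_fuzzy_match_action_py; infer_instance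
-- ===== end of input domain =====

-- ===== PORT A =====
-- B changes the decomposition: one pass with a first-containment accumulator instead of A's two scans (objective: alternative).
def fmaLoop1 (al : String) : List String → Option String
  | [] => none
  | la :: rest => if PySem.Str.lower la == al then some la else fmaLoop1 al rest

def fmaLoop2 (al : String) : List String → Option String
  | [] => none
  | la :: rest => if PySem.Str.isIn (PySem.Str.lower la) al then some la else fmaLoop2 al rest

def fuzzy_match_action_py (action : String) (legal_actions : List String) : Option String :=
  let action_lower := PySem.Str.lower (PySem.Str.strip action)
  match fmaLoop1 action_lower legal_actions with
  | some la => some la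
  | none => fmaLoop2 action_lower legal_actions

-- ===== PORT B =====
def fmaAltLoop (al : String) (first_contains : Option String) : List String → Option String
  | [] => first_contains
  | la :: rest =>
    let llow := PySem.Str.lower la
    if llow == al then some la
    else if first_contains.isNone && PySem.Str.isIn llow al then
      fmaAltLoop al (some la) rest
    else fmaAltLoop al first_contains rest

def fuzzy_match_action_py_alt (action : String) (legal_actions : List String) : Option String :=
  fmaAltLoop (PySem.Str.lower (PySem.Str.strip action)) none legal_actions

-- ===== PRECONDITION & SPEC =====
def Spec_fuzzy_match_action_py (action : String) (legal_actions : List String) (out : Option String) : Prop := out = fuzzy_match_action_py_alt action legal_actions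
instance (action : String) (legal_actions : List String) (out : Option String) : Decidable (Spec_fuzzy_match_action_py action legal_actions out) := by unfold Spec_fuzzy_match_action_py; infer_instance

-- ===== CLAIM (what is proved, stated in full; the proofs are below) =====
def Claim_equal_fuzzy_match_action_py : Prop := ∀ (action : String) (legal_actions : List String), Dom_fuzzy_match_action_py action legal_actions → Spec_fuzzy_match_action_py action legal_actions (fuzzy_match_action_py action legal_actions)

-- ===== LEMMAS AND PROOFS =====
-- Loop invariant: B's single pass equals A's two-scan result, with the pending
-- first-containment accumulator fc standing in for the second scan's answer so far.
theorem fmaAltLoop_eq (al : String) (l : List String) (fc : Option String) :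
    fmaAltLoop al fc l =
      match fmaLoop1 al l with
      | some la => some la
      | none => match fc with
        | some x => some x
        | none => fmaLoop2 al l := by
  induction l generalizing fc with
  | nil => cases fc <;> simp [fmaAltLoop, fmaLoop1, fmaLoop2]
  | cons la rest ih =>
    simp only [fmaAltLoop, fmaLoop1, fmaLoop2]
    by_cases hx : (PySem.Str.lower la == al) = true
    · simp [hx]
    · simp only [hx, if_neg, Bool.not_eq_true] at *
      cases fc with
      | some x =>
        simp [ih]
      | none =>
        by_cases hc : PySem.Chars.isIn (PySem.Chars.lower la.toList) al.toList = true
        · cases h1 : fmaLoop1 al rest <;> simp [ih, h1, hc]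
        · cases h1 : fmaLoop1 al rest <;> simp [ih, h1, hc]

-- ===== VERDICT (by name: the statement is the Claim_ definition above) =====
theorem fuzzy_match_action_py_spec : Claim_equal_fuzzy_match_action_py := by
  intro action legal_actions _
  unfold Spec_fuzzy_match_action_py fuzzy_match_action_py fuzzy_match_action_py_alt
  rw [fmaAltLoop_eq]
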